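-- pv_equiv track=rewrite | github.com/LyapinAlex/NestingProblem-BMW2022 | Compressed_encoding/check_item.py | get_pixel
-- ===== SOURCE A (Python) =====
-- def get_pixel(list_units: list, pixel_num: int) -> tuple[int, int]:  #Decompression
--     """По номеру пикселя в строке, возвращет содержание этого пикселя и номер ячейки в которой он содержится\\
--     Returns:
--         pixel_value: значение пикселя по pixel_num
--         unit_num: номер ячейки к которой относится pixel_num"""
--     sum_units = 0
--     unit_num = -1
--     while (sum_units < pixel_num + 1):
--         unit_num += 1
--         sum_units += abs(list_units[unit_num])
--
--     pixel_value = sum_units - pixel_num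
--     if list_units[unit_num] < 0:
--         pixel_value *= -1
--
--     return pixel_value, unit_num
-- ===== SOURCE B (Python) =====
-- def get_pixel(list_units: list, pixel_num: int) -> tuple[int, int]:
--     # Prefix sums of the run lengths once, then binary search for the run.
--     prefix = [0]
--     for u in list_units:
--         prefix.append(prefix[-1] + abs(u))
--     target = pixel_num + 1
--     lo, hi = 0, len(prefix)
--     while lo < hi:
--         mid = (lo + hi) // 2
--         if prefix[mid] < target:
--             lo = mid + 1
--         else:
--             hi = mid
--     unit_num = lo - 1
--     pixel_value = prefix[lo] - pixel_num
--     if list_units[unit_num] < 0: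
--         pixel_value = -pixel_value
--     return pixel_value, unit_num
-- ===== Notes on version B (the rewrite author's own statement) =====
-- stated objective: alternative
-- what changed: A's incremental early-terminating while-scan is replaced by building a prefix-sum table of the absolute run lengths once and locating the run with a hand-written bisect_left binary search over it.
import Mathlib
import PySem

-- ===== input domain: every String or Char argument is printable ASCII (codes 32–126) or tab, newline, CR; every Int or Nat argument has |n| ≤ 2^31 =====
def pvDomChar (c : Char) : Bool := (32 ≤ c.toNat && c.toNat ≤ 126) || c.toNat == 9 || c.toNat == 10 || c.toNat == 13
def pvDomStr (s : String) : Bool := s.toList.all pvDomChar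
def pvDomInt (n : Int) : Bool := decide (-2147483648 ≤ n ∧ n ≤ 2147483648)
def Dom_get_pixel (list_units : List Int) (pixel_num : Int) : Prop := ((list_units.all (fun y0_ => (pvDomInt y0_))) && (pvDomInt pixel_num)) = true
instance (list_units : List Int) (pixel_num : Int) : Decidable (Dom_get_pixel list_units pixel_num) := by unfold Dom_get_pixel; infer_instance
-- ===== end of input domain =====

-- B replaces A's incremental early-terminating scan by a prefix-sum table plus a
-- binary search (alternative decomposition, not claimed faster).

-- ===== PORT A =====
-- A's while loop; fuel list_units.length + 1 bounds its iteration count exactly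
-- (the `none` branch is Python's IndexError, excluded by Pre_).
def pvALoop (L : List Int) (target : Int) (sum_units unit_num : Int) : Nat → Int × Int
  | 0 => (sum_units, unit_num)
  | Nat.succ fuel =>
    if sum_units < target then
      match PySem.List.pyGet? L (unit_num + 1) with
      | some v => pvALoop L target (sum_units + |v|) (unit_num + 1) fuel
      | none => (sum_units, unit_num)   -- IndexError (outside Pre_)
    else (sum_units, unit_num)

def get_pixel (list_units : List Int) (pixel_num : Int) : Int × Int :=
  let st := pvALoop list_units (pixel_num + 1) 0 (-1) (list_units.length + 1)
  let pixel_value := st.1 - pixel_num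
  match PySem.List.pyGet? list_units st.2 with
  | some v => (if v < 0 then -pixel_value else pixel_value, st.2)
  | none => (pixel_value, st.2)   -- IndexError (outside Pre_)

-- ===== PORT B =====
-- prefix = [0]; for u in list_units: prefix.append(prefix[-1] + abs(u))
def pvPrefix (acc : Int) : List Int → List Int
  | [] => [acc]
  | u :: t => acc :: pvPrefix (acc + |u|) t

-- the hand-written bisect_left loop of Source B; hi - lo shrinks each iteration, so
-- fuel = the initial hi - lo = p.length bounds the iteration count
def pvBis (p : List Int) (target : Int) (lo hi : Nat) : Nat → Nat
  | 0 => lo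
  | Nat.succ fuel =>
    if lo < hi then
      let mid := (lo + hi) / 2
      if p.getD mid 0 < target then pvBis p target (mid + 1) hi fuel
      else pvBis p target lo mid fuel
    else lo

def get_pixel_alt (list_units : List Int) (pixel_num : Int) : Int × Int :=
  let pre := pvPrefix 0 list_units
  let lo := pvBis pre (pixel_num + 1) 0 pre.length pre.length
  let unit_num : Int := (lo : Int) - 1
  let pixel_value := pre.getD lo 0 - pixel_num   -- prefix[lo]; in range under Pre_
  match PySem.List.pyGet? list_units unit_num with
  | some v => (if v < 0 then -pixel_value else pixel_value, unit_num)
  | none => (pixel_value, unit_num)   -- IndexError (outside Pre_)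

-- ===== PRECONDITION & SPEC =====
-- Pre_ is exactly where A returns (otherwise list indexing raises IndexError):
-- either pixel_num < 0 with a nonempty list (the loop body never runs), or
-- 0 ≤ pixel_num strictly below the total of the absolute run lengths.
def Pre_get_pixel (list_units : List Int) (pixel_num : Int) : Prop :=
  (pixel_num < 0 ∧ list_units ≠ []) ∨
  (0 ≤ pixel_num ∧ pixel_num + 1 ≤ (list_units.map (fun u => |u|)).sum)
instance (list_units : List Int) (pixel_num : Int) : Decidable (Pre_get_pixel list_units pixel_num) := by unfold Pre_get_pixel; infer_instance

def pvWitness_get_pixel : List Int × Int := ([3, -2, 4], 4)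

def Spec_get_pixel (list_units : List Int) (pixel_num : Int) (out : Int × Int) : Prop := out = get_pixel_alt list_units pixel_num
instance (list_units : List Int) (pixel_num : Int) (out : Int × Int) : Decidable (Spec_get_pixel list_units pixel_num out) := by unfold Spec_get_pixel; infer_instance

-- ===== CLAIM (what is proved, stated in full; the proofs are below) =====
def Claim_equal_get_pixel : Prop := ∀ (list_units : List Int) (pixel_num : Int), Dom_get_pixel list_units pixel_num → Pre_get_pixel list_units pixel_num → Spec_get_pixel list_units pixel_num (get_pixel list_units pixel_num)

-- ===== LEMMAS AND PROOFS =====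

-- S L k = sum of |u| over the first k units (the k-th prefix sum)
def pvS (L : List Int) (k : Nat) : Int := ((L.take k).map (fun u => |u|)).sum

theorem pvS_zero (L : List Int) : pvS L 0 = 0 := rfl

theorem pvS_succ (L : List Int) (k : Nat) (h : k < L.length) :
    pvS L (k + 1) = pvS L k + |L[k]| := by
  have h' : k < (L.map (fun u => |u|)).length := by simpa using h
  simpa [pvS, List.map_take] using List.sum_take_succ (L.map (fun u => |u|)) k h'

theorem pvS_mono (L : List Int) {j k : Nat} (hjk : j ≤ k) (hk : k ≤ L.length) :
    pvS L j ≤ pvS L k := by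
  induction k with
  | zero =>
    have : j = 0 := by omega
    simp [this]
  | succ k ih =>
    rcases Nat.lt_or_ge j (k + 1) with h | h
    · have := ih (by omega) (by omega)
      have := pvS_succ L k (by omega)
      have : (0:Int) ≤ |L[k]'(by omega)| := abs_nonneg _
      omega
    · have : j = k + 1 := by omega
      simp [this]

theorem pvS_full (L : List Int) : pvS L L.length = (L.map (fun u => |u|)).sum := by
  simp [pvS]

theorem pvPrefix_length (acc : Int) (L : List Int) : (pvPrefix acc L).length = L.length + 1 := by
  induction L generalizing acc with
  | nil => rfl
  | cons u t ih => simp [pvPrefix, ih]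

theorem pvPrefix_getD (L : List Int) (acc : Int) (i : Nat) (hi : i ≤ L.length) :
    (pvPrefix acc L).getD i 0 = acc + pvS L i := by
  induction L generalizing acc i with
  | nil =>
    have : i = 0 := by simpa using hi
    subst this
    simp [pvPrefix, pvS]
  | cons u t ih =>
    cases i with
    | zero => simp [pvPrefix, pvS]
    | succ i =>
      have ht' : i ≤ t.length := by simpa using hi
      have hs : pvS (u :: t) (i + 1) = |u| + pvS t i := by
        simp [pvS, List.take_succ_cons]
      rw [show pvPrefix acc (u :: t) = acc :: pvPrefix (acc + |u|) t from rfl,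
        List.getD_cons_succ, ih (acc + |u|) i ht', hs]
      ring

-- A's loop, started at unit index m with the matching running sum, stops at the
-- first r ≥ m whose prefix sum reaches the target.
theorem pvALoop_spec (L : List Int) (t : Int) (ht : t ≤ pvS L L.length) :
    ∀ (fuel m : Nat), m ≤ L.length → L.length + 1 - m ≤ fuel →
    ∃ r : Nat, m ≤ r ∧ r ≤ L.length ∧ t ≤ pvS L r ∧
      (∀ j : Nat, m ≤ j → j < r → pvS L j < t) ∧
      pvALoop L t (pvS L m) ((m : Int) - 1) fuel = (pvS L r, (r : Int) - 1) := by
  intro fuel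
  induction fuel with
  | zero => intro m hm hf; omega
  | succ fuel ih =>
    intro m hm hf
    by_cases hlt : pvS L m < t
    · have hmn : m < L.length := by
        rcases Nat.lt_or_ge m L.length with h | h
        · exact h
        · have : m = L.length := by omega
          subst this; omega
      have hget : PySem.List.pyGet? L ((m : Int) - 1 + 1) = some L[m] := by
        have : (m : Int) - 1 + 1 = (m : Int) := by ring
        rw [this, PySem.List.pyGet?_natCast, List.getElem?_eq_getElem hmn]
      obtain ⟨r, hr1, hr2, hr3, hr4, hr5⟩ := ih (m + 1) (by omega) (by omega)
      refine ⟨r, by omega, hr2, hr3, ?_, ?_⟩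
      · intro j hj1 hj2
        rcases Nat.eq_or_lt_of_le hj1 with h | h
        · subst h; exact hlt
        · exact hr4 j h hj2
      · have hsum : pvS L m + |L[m]| = pvS L (m + 1) := (pvS_succ L m hmn).symm
        have hidx : (m : Int) - 1 + 1 = ((m + 1 : Nat) : Int) - 1 := by push_cast; ring
        simp only [pvALoop, if_pos hlt, hget]
        rw [hsum, hidx]
        exact hr5
    · exact ⟨m, le_refl m, hm, by omega, by omega, by simp [pvALoop, if_neg hlt]⟩

-- the bisect loop, given the loop invariant, keeps it and terminates with it
theorem pvBis_spec (L : List Int) (t : Int) :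
    ∀ (fuel lo hi : Nat), hi - lo ≤ fuel → lo ≤ hi → hi ≤ L.length + 1 →
    (∀ j : Nat, j < lo → pvS L j < t) →
    (∀ j : Nat, hi ≤ j → j ≤ L.length → t ≤ pvS L j) →
    (∀ j : Nat, j < pvBis (pvPrefix 0 L) t lo hi fuel → pvS L j < t) ∧
    (∀ j : Nat, pvBis (pvPrefix 0 L) t lo hi fuel ≤ j → j ≤ L.length → t ≤ pvS L j) ∧
    pvBis (pvPrefix 0 L) t lo hi fuel ≤ L.length + 1 := by
  intro fuel
  induction fuel with
  | zero =>
    intro lo hi hd hlh hhi hlow hhigh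
    simp only [pvBis]
    exact ⟨hlow, by intro j hj1 hj2; exact hhigh j (by omega) hj2, by omega⟩
  | succ d ih =>
    intro lo hi hd hlh hhi hlow hhigh
    by_cases h : lo < hi
    · simp only [pvBis, if_pos h]
      have hmid1 : lo ≤ (lo + hi) / 2 := by omega
      have hmid2 : (lo + hi) / 2 < hi := by omega
      have hmidn : (lo + hi) / 2 ≤ L.length := by omega
      have hgd : (pvPrefix 0 L).getD ((lo + hi) / 2) 0 = pvS L ((lo + hi) / 2) := by
        rw [pvPrefix_getD L 0 _ hmidn]; ring
      by_cases hc : (pvPrefix 0 L).getD ((lo + hi) / 2) 0 < t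
      · rw [if_pos hc]
        refine ih ((lo + hi) / 2 + 1) hi (by omega) (by omega) hhi ?_ hhigh
        intro j hj
        calc pvS L j ≤ pvS L ((lo + hi) / 2) := pvS_mono L (by omega) hmidn
          _ < t := by rwa [hgd] at hc
      · rw [if_neg hc]
        refine ih lo ((lo + hi) / 2) (by omega) (by omega) (by omega) hlow ?_
        intro j hj1 hj2
        calc t ≤ pvS L ((lo + hi) / 2) := by rw [← hgd]; omega
          _ ≤ pvS L j := pvS_mono L hj1 hj2
    · simp only [pvBis, if_neg h]
      exact ⟨hlow, by intro j hj1 hj2; exact hhigh j (by omega) hj2, by omega⟩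

-- ===== VERDICT (by name: the statement is the Claim_ definition above) =====
theorem get_pixel_spec : Claim_equal_get_pixel := by
  intro L p _ hpre
  unfold Spec_get_pixel get_pixel get_pixel_alt
  set t := p + 1 with ht
  have htot : t ≤ pvS L L.length := by
    rcases hpre with ⟨hp, hne⟩ | ⟨hp, hs⟩
    · have h0 : pvS L 0 = 0 := pvS_zero L
      have : (0:Nat) ≤ L.length := by omega
      have := pvS_mono L this (le_refl _)
      omega
    · rw [pvS_full]; omega
  -- characterise A's loop result
  obtain ⟨rA, _, hrA2, hrA3, hrA4, hrA5⟩ :=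
    pvALoop_spec L t htot (L.length + 1) 0 (by omega) (by omega)
  -- characterise B's bisect result
  have hplen : (pvPrefix 0 L).length = L.length + 1 := pvPrefix_length 0 L
  obtain ⟨hB1, hB2, hB3⟩ :=
    pvBis_spec L t (L.length + 1) 0 (L.length + 1) (by omega) (by omega) (by omega)
      (by omega) (by intro j hj1 hj2; omega)
  set rB := pvBis (pvPrefix 0 L) t 0 (L.length + 1) (L.length + 1) with hrB
  have hrBn : rB ≤ L.length := by
    rcases Nat.lt_or_ge rB (L.length + 1) with h | h
    · omega
    · exfalso
      have h1 := hB1 L.length (by omega)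
      omega
  -- the two stopping indices agree
  have hreq : rA = rB := by
    rcases Nat.lt_trichotomy rA rB with h | h | h
    · have := hB1 rA h; omega
    · exact h
    · have := hrA4 rB (by omega) h
      have := hB2 rB (le_refl _) hrBn
      omega
  have hgd : (pvPrefix 0 L).getD rB 0 = pvS L rB := by
    rw [pvPrefix_getD L 0 rB hrBn]; ring
  have hA : pvALoop L t 0 (-1) (L.length + 1) = (pvS L rA, (rA : Int) - 1) := by
    have h0 : pvS L 0 = 0 := rfl
    simpa [h0] using hrA5
  simp only [hplen, ← hrB, hA, hgd, hreq]
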